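-- pv_equiv track=rewrite | github.com/ineed-coffee/PS_source_code | Programmers/42840.모의고사.py | solution
-- ===== SOURCE A (Python) =====
-- def solution(answers):
--
--     A = [1,2,3,4,5]
--     A_L = len(A)
--     B = [2,1,2,3,2,4,2,5]
--     B_L = len(B)
--     C = [3,3,1,1,2,2,4,4,5,5]
--     C_L = len(C)
--
--     scores={"A":0,"B":0,"C":0}
--
--     for i,answer in enumerate(answers):
--         if A[i%A_L]==answer:
--             scores["A"]+=1
--         if B[i%B_L]==answer:
--             scores["B"]+=1
--         if C[i%C_L]==answer:
--             scores["C"]+=1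
--
--     high_score = max(scores.values())
--     return_list=[]
--     for i,supo in enumerate(["A","B","C"]):
--         if scores[supo]==high_score:
--             return_list.append(i+1)
--     return return_list
--
--
--     return answer
-- ===== SOURCE B (Python) =====
-- def solution(answers):
--     # Period of all three patterns is lcm(5, 8, 10) = 40: whether answers[i]
--     # matches a pattern depends only on (i % 40, answers[i]).  So build ONE
--     # frequency table of those pairs, then read each score off the table with
--     # 40 lookups instead of re-scanning the answers per pattern.
--     pats = [[1, 2, 3, 4, 5],
--             [2, 1, 2, 3, 2, 4, 2, 5],
--             [3, 3, 1, 1, 2, 2, 4, 4, 5, 5]]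
--     cnt = {}
--     for i, a in enumerate(answers):
--         cnt[(i % 40, a)] = cnt.get((i % 40, a), 0) + 1
--     scores = [sum(cnt.get((r, p[r % len(p)]), 0) for r in range(40)) for p in pats]
--     best = max(scores)
--     return [i + 1 for i, s in enumerate(scores) if s == best]
-- ===== Notes on version B (the rewrite author's own statement) =====
-- stated objective: alternative
-- what changed: Instead of comparing every answer against the three patterns, B exploits that lcm(5,8,10)=40 makes each match depend only on (i % 40, answers[i]): it builds one frequency table of those pairs in a single pass and then reads each pattern's score off the table with 40 lookups, replacing per-element pattern comparisons by a residue-indexed counter.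
import Mathlib
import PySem

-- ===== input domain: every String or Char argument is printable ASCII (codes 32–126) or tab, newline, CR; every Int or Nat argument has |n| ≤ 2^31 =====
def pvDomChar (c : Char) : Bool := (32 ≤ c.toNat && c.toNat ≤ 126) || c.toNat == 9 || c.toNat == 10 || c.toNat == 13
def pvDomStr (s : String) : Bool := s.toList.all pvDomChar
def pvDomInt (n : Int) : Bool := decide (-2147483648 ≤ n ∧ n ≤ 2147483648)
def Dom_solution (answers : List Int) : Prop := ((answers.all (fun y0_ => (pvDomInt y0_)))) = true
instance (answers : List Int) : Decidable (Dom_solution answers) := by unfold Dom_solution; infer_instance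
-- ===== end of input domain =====

-- B replaces A's per-element comparison against three cyclic patterns by a
-- frequency table of (i % 40, answers[i]) pairs (40 = lcm of the pattern
-- lengths) read back with 40 lookups per pattern (objective: alternative).


-- ===== PORT A =====
-- Literal transliteration of A: one loop over enumerate(answers) updating a dict
-- with keys "A","B","C"; then max over the values and a loop collecting i+1.
def solution (answers : List Int) : List Int :=
  let A : List Int := [1,2,3,4,5]
  let A_L : Int := (A.length : Int)
  let B : List Int := [2,1,2,3,2,4,2,5]
  let B_L : Int := (B.length : Int)
  let C : List Int := [3,3,1,1,2,2,4,4,5,5]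
  let C_L : Int := (C.length : Int)
  let scores : PySem.Dict String Int :=
    PySem.Dict.ofList [("A", 0), ("B", 0), ("C", 0)]
  let scores := (PySem.List.enumerate answers).foldl
    (fun sc (p : Int × Int) =>
      let sc := if PySem.List.pyGet? A (PySem.Int.mod p.1 A_L) = some p.2
                then sc.modify "A" 0 (· + 1) else sc
      let sc := if PySem.List.pyGet? B (PySem.Int.mod p.1 B_L) = some p.2
                then sc.modify "B" 0 (· + 1) else sc
      if PySem.List.pyGet? C (PySem.Int.mod p.1 C_L) = some p.2
      then sc.modify "C" 0 (· + 1) else sc)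
    scores
  -- max(scores.values()): the dict always has its three keys, so values is nonempty
  let high_score : Int := (PySem.List.max? scores.values (fun v => v)).getD 0
  (PySem.List.enumerate ["A", "B", "C"]).foldl
    (fun acc (p : Int × String) =>
      if scores.getD p.2 0 = high_score then acc ++ [p.1 + 1] else acc) []

-- ===== PORT B =====
-- Transliteration of B: one pass building a frequency dict keyed by
-- (i % 40, answer); each score is the sum of 40 table lookups.
def solution_alt (answers : List Int) : List Int :=
  let pats : List (List Int) :=
    [[1,2,3,4,5], [2,1,2,3,2,4,2,5], [3,3,1,1,2,2,4,4,5,5]]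
  let cnt : PySem.Dict (Int × Int) Int :=
    (PySem.List.enumerate answers).foldl
      (fun d (q : Int × Int) =>
        d.insert (PySem.Int.mod q.1 40, q.2) (d.getD (PySem.Int.mod q.1 40, q.2) 0 + 1))
      PySem.Dict.empty
  let scores : List Int := pats.map (fun p =>
    ((PySem.List.pyRange 0 40 1).map (fun r =>
      cnt.getD (r, PySem.List.pyGetD p (PySem.Int.mod r (p.length : Int)) 0) 0)).sum)
  let best : Int := (PySem.List.max? scores (fun v => v)).getD 0
  (PySem.List.enumerate scores).foldl
    (fun acc (q : Int × Int) => if q.2 = best then acc ++ [q.1 + 1] else acc) []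

-- ===== PRECONDITION & SPEC =====
def Spec_solution (answers : List Int) (out : List Int) : Prop := out = solution_alt answers
instance (answers : List Int) (out : List Int) : Decidable (Spec_solution answers out) := by unfold Spec_solution; infer_instance

-- ===== CLAIM (what is proved, stated in full; the proofs are below) =====
def Claim_equal_solution : Prop := ∀ (answers : List Int), Dom_solution answers → Spec_solution answers (solution answers)

-- ===== LEMMAS AND PROOFS =====

-- A's per-pattern count, with explicit accumulator
def pvCnt (p : List Int) (l : List (Int × Int)) (s : Int) : Int :=
  l.foldl (fun s (q : Int × Int) =>
    if PySem.List.pyGet? p (PySem.Int.mod q.1 (p.length : Int)) = some q.2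
    then s + 1 else s) s

-- A's combined fold keeps the dict as the literal three-entry list whose values
-- are the accumulators plus the three independent counts.
theorem pvFold_dict (l : List (Int × Int)) (a b c : Int) :
    l.foldl
      (fun sc (p : Int × Int) =>
        let sc := if PySem.List.pyGet? [1,2,3,4,5] (PySem.Int.mod p.1 (5:Int)) = some p.2
                  then PySem.Dict.modify sc "A" 0 (· + 1) else sc
        let sc := if PySem.List.pyGet? [2,1,2,3,2,4,2,5] (PySem.Int.mod p.1 (8:Int)) = some p.2
                  then PySem.Dict.modify sc "B" 0 (· + 1) else sc
        if PySem.List.pyGet? [3,3,1,1,2,2,4,4,5,5] (PySem.Int.mod p.1 (10:Int)) = some p.2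
        then PySem.Dict.modify sc "C" 0 (· + 1) else sc)
      (PySem.Dict.ofList [("A", a), ("B", b), ("C", c)])
    = PySem.Dict.ofList
        [("A", pvCnt [1,2,3,4,5] l a),
         ("B", pvCnt [2,1,2,3,2,4,2,5] l b),
         ("C", pvCnt [3,3,1,1,2,2,4,4,5,5] l c)] := by
  induction l generalizing a b c with
  | nil => simp [pvCnt]
  | cons h t ih =>
      simp only [List.foldl_cons]
      have hstep :
          (let sc := if PySem.List.pyGet? [1,2,3,4,5] (PySem.Int.mod h.1 (5:Int)) = some h.2
                     then PySem.Dict.modify (PySem.Dict.ofList [("A", a), ("B", b), ("C", c)]) "A" 0 (· + 1)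
                     else PySem.Dict.ofList [("A", a), ("B", b), ("C", c)]
           let sc := if PySem.List.pyGet? [2,1,2,3,2,4,2,5] (PySem.Int.mod h.1 (8:Int)) = some h.2
                     then sc.modify "B" 0 (· + 1) else sc
           if PySem.List.pyGet? [3,3,1,1,2,2,4,4,5,5] (PySem.Int.mod h.1 (10:Int)) = some h.2
           then sc.modify "C" 0 (· + 1) else sc)
          = PySem.Dict.ofList
              [("A", if PySem.List.pyGet? [1,2,3,4,5] (PySem.Int.mod h.1 (5:Int)) = some h.2 then a + 1 else a),
               ("B", if PySem.List.pyGet? [2,1,2,3,2,4,2,5] (PySem.Int.mod h.1 (8:Int)) = some h.2 then b + 1 else b),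
               ("C", if PySem.List.pyGet? [3,3,1,1,2,2,4,4,5,5] (PySem.Int.mod h.1 (10:Int)) = some h.2 then c + 1 else c)] := by
        split_ifs <;>
          simp [PySem.Dict.ofList, PySem.Dict.modify, PySem.Dict.update, PySem.Dict.insert,
                PySem.Dict.get?, PySem.Dict.empty, PySem.Dict.getD, PySem.Dict.contains]
      rw [hstep, ih]
      simp only [pvCnt, List.foldl_cons]
      norm_num

-- sum over range(0,m) of the indicator "x = (r, f r)" collapses to one test on x
theorem pvRangeIndicator (f : Int → Int) (x : Int × Int) (m : Nat) :
    ((PySem.List.pyRange 0 (m : Int) 1).map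
      (fun r => if x = (r, f r) then (1:Int) else 0)).sum
    = if 0 ≤ x.1 ∧ x.1 < (m : Int) ∧ x.2 = f x.1 then 1 else 0 := by
  induction m with
  | zero =>
      simp only [Nat.cast_zero, PySem.List.pyRange_one_eq_nil le_rfl,
        List.map_nil, List.sum_nil]
      rw [if_neg (by rintro ⟨h1, h2, -⟩; omega)]
  | succ n ih =>
      rw [show ((n+1 : Nat) : Int) = (n:Int) + 1 from by push_cast; ring,
          PySem.List.pyRange_one_succ_right (Int.natCast_nonneg n)]
      rw [List.map_append, List.sum_append, ih]
      simp only [List.map_cons, List.map_nil, List.sum_cons, List.sum_nil]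
      rcases x with ⟨x1, x2⟩
      simp only [Prod.ext_iff]
      by_cases hx : x1 = (n:Int)
      · subst hx
        split_ifs with h1 h2 h3 h4 h5 <;> simp_all
      · split_ifs with h1 h2 h3 h4 h5 <;> simp_all <;> omega

-- summing the pair-counts over range(40) counts the keys hitting the graph of f
theorem pvSumCount (f : Int → Int) (keys : List (Int × Int)) :
    ((PySem.List.pyRange 0 40 1).map
      (fun r => ((keys.count (r, f r) : Int)))).sum
    = (keys.countP
        (fun k => decide (0 ≤ k.1 ∧ k.1 < 40 ∧ k.2 = f k.1)) : Int) := by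
  induction keys with
  | nil => simp
  | cons x ks ih =>
      have hsplit : ∀ r : Int, (((x :: ks).count (r, f r) : Int))
          = ((ks.count (r, f r) : Int)) + (if x = (r, f r) then (1:Int) else 0) := by
        intro r
        rw [List.count_cons]
        split_ifs with h <;> simp_all
      have h40 := pvRangeIndicator f x 40
      norm_num at h40
      calc ((PySem.List.pyRange 0 40 1).map
              (fun r => (((x :: ks).count (r, f r) : Int)))).sum
          = ((PySem.List.pyRange 0 40 1).map
              (fun r => ((ks.count (r, f r) : Int))
                + (if x = (r, f r) then (1:Int) else 0))).sum := by
            simp only [hsplit]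
        _ = ((PySem.List.pyRange 0 40 1).map
              (fun r => ((ks.count (r, f r) : Int)))).sum
            + ((PySem.List.pyRange 0 40 1).map
              (fun r => if x = (r, f r) then (1:Int) else 0)).sum := by
            rw [PySem.List.sum_map_add_int]
        _ = _ := by
            rw [ih, h40, List.countP_cons]
            by_cases hx : (0 ≤ x.1 ∧ x.1 < 40 ∧ x.2 = f x.1) <;> simp [hx]

-- per-pattern equality, over any pair list with nonnegative indices
theorem pvScoreAux (p : List Int) (hpos : 0 < p.length) (hdvd : ((p.length : Int)) ∣ 40)
    (l : List (Int × Int)) (hnn : ∀ q ∈ l, 0 ≤ q.1) :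
    ((PySem.List.pyRange 0 40 1).map (fun r =>
      ((l.foldl
          (fun d (q : Int × Int) =>
            d.insert (PySem.Int.mod q.1 40, q.2) (d.getD (PySem.Int.mod q.1 40, q.2) 0 + 1))
          PySem.Dict.empty).getD
        (r, PySem.List.pyGetD p (PySem.Int.mod r (p.length : Int)) 0) 0))).sum
    = pvCnt p l 0 := by
  have hLpos : (0:Int) < (p.length : Int) := by exact_mod_cast hpos
  have hfold : (l.foldl
          (fun d (q : Int × Int) =>
            d.insert (PySem.Int.mod q.1 40, q.2) (d.getD (PySem.Int.mod q.1 40, q.2) 0 + 1))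
          (PySem.Dict.empty : PySem.Dict (Int × Int) Int))
      = ((l.map (fun q : Int × Int => (PySem.Int.mod q.1 40, q.2))).foldl
          (fun d k => d.insert k (d.getD k 0 + 1)) PySem.Dict.empty) := by
    rw [List.foldl_map]
  rw [hfold]
  simp only [PySem.Dict.getD_foldl_insert_add_one]
  have hempty : ∀ k : Int × Int, (PySem.Dict.empty : PySem.Dict (Int × Int) Int).getD k 0 = 0 := by
    intro k
    simp [PySem.Dict.getD, PySem.Dict.get?, PySem.Dict.empty]
  simp only [hempty, zero_add]
  rw [pvSumCount (fun r => PySem.List.pyGetD p (PySem.Int.mod r (p.length : Int)) 0)]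
  rw [List.countP_map]
  have hc := PySem.List.foldl_count_if
    (fun q : Int × Int => decide (PySem.List.pyGet? p (PySem.Int.mod q.1 (p.length : Int)) = some q.2)) l 0
  simp only [decide_eq_true_eq] at hc
  unfold pvCnt
  rw [hc, zero_add]
  apply congrArg
  apply List.countP_congr
  intro q hq
  have h0 : 0 ≤ q.1 := hnn q hq
  have hm0 : 0 ≤ PySem.Int.mod q.1 40 := PySem.Int.mod_nonneg q.1 (by norm_num)
  have hm1 : PySem.Int.mod q.1 40 < 40 := PySem.Int.mod_lt q.1 (by norm_num)
  have hmm : PySem.Int.mod (PySem.Int.mod q.1 40) (p.length : Int)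
      = PySem.Int.mod q.1 (p.length : Int) := by
    rw [PySem.Int.mod_eq_emod_of_pos hLpos, PySem.Int.mod_eq_emod_of_pos hLpos,
        PySem.Int.mod_eq_emod_of_pos (by norm_num : (0:Int) < 40)]
    exact Int.emod_emod_of_dvd q.1 hdvd
  have hi0 : 0 ≤ PySem.Int.mod q.1 (p.length : Int) := PySem.Int.mod_nonneg q.1 hLpos
  have hi1 : PySem.Int.mod q.1 (p.length : Int) < (p.length : Int) := PySem.Int.mod_lt q.1 hLpos
  simp only [Function.comp, hmm, decide_eq_true_eq]
  rw [PySem.List.pyGet?_eq_some_getElem p hi0 hi1,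
      PySem.List.pyGetD_eq_getElem p 0 hi0 hi1]
  constructor
  · rintro ⟨-, -, h⟩; exact congrArg some h.symm
  · intro h; exact ⟨hm0, hm1, (Option.some_inj.mp h).symm⟩

-- B's score fold over enumerate(answers) equals A's direct count, per pattern
theorem pvScore (p : List Int) (hpos : 0 < p.length) (hdvd : ((p.length : Int)) ∣ 40)
    (answers : List Int) :
    ((PySem.List.pyRange 0 40 1).map (fun r =>
      (((PySem.List.enumerate answers).foldl
          (fun d (q : Int × Int) =>
            d.insert (PySem.Int.mod q.1 40, q.2) (d.getD (PySem.Int.mod q.1 40, q.2) 0 + 1))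
          PySem.Dict.empty).getD
        (r, PySem.List.pyGetD p (PySem.Int.mod r (p.length : Int)) 0) 0))).sum
    = pvCnt p (PySem.List.enumerate answers) 0 := by
  apply pvScoreAux p hpos hdvd
  intro q hq
  have hmem : q.1 ∈ (PySem.List.enumerate answers).map (fun x => x.1) :=
    List.mem_map_of_mem hq
  rw [PySem.List.map_fst_enumerate] at hmem
  exact (PySem.List.mem_pyRange_one.mp hmem).1

-- the post-loop part of A on the literal dict equals the post-loop part of B on the score list
theorem pvTail (a b c : Int) :
    (PySem.List.enumerate ["A", "B", "C"]).foldl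
      (fun acc (p : Int × String) =>
        if (PySem.Dict.ofList [("A", a), ("B", b), ("C", c)]).getD p.2 0
           = (PySem.List.max? (PySem.Dict.ofList [("A", a), ("B", b), ("C", c)]).values (fun v => v)).getD 0
        then acc ++ [p.1 + 1] else acc) []
    = (PySem.List.enumerate [a, b, c]).foldl
        (fun acc (q : Int × Int) =>
          if q.2 = (PySem.List.max? [a, b, c] (fun v => v)).getD 0
          then acc ++ [q.1 + 1] else acc) [] := by
  simp [PySem.List.enumerate, PySem.Dict.ofList, PySem.Dict.update, PySem.Dict.insert,
        PySem.Dict.get?, PySem.Dict.empty, PySem.Dict.getD, PySem.Dict.contains,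
        PySem.Dict.values]

theorem solution_eq_alt (answers : List Int) :
    solution answers = solution_alt answers := by
  unfold solution solution_alt
  simp only []
  rw [show ((([1,2,3,4,5] : List Int).length : Int)) = 5 from by norm_num,
      show ((([2,1,2,3,2,4,2,5] : List Int).length : Int)) = 8 from by norm_num,
      show ((([3,3,1,1,2,2,4,4,5,5] : List Int).length : Int)) = 10 from by norm_num]
  rw [pvFold_dict]
  simp only [List.map_cons, List.map_nil]
  simp only [pvScore [1,2,3,4,5] (by norm_num) (by norm_num) answers,
      pvScore [2,1,2,3,2,4,2,5] (by norm_num) (by norm_num) answers,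
      pvScore [3,3,1,1,2,2,4,4,5,5] (by norm_num) (by norm_num) answers]
  exact pvTail _ _ _

-- ===== VERDICT (by name: the statement is the Claim_ definition above) =====
theorem solution_spec : Claim_equal_solution := by
  intro answers _
  unfold Spec_solution
  exact solution_eq_alt answers
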